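-- pv_equiv track=rewrite | github.com/VagishKapila/gpt-material-insight-api | ai_scope_tracking.py | compare_scope_to_daily_log
-- ===== SOURCE A (Python) =====
-- def compare_scope_to_daily_log(scope_tasks, work_done):
--     """Match work done text against scope tasks"""
--     work = work_done.lower()
--     completed, pending = [], []
--     for task in scope_tasks:
--         if task.lower() in work:
--             completed.append(task)
--         else:
--             pending.append(task)
--     return {"completed": completed, "pending": pending}
-- ===== SOURCE B (Python) =====
-- def compare_scope_to_daily_log(scope_tasks, work_done):
--     """Match work done text against scope tasks"""
--     work = work_done.lower()
--     lowered = [t.lower() for t in scope_tasks]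
--     lengths = set(len(p) for p in lowered)
--     subs = set()
--     for length in lengths:
--         for pos in range(len(work) - length + 1):
--             subs.add(work[pos:pos + length])
--     return {
--         "completed": [t for t, p in zip(scope_tasks, lowered) if p in subs],
--         "pending": [t for t, p in zip(scope_tasks, lowered) if p not in subs],
--     }
-- ===== Notes on version B (the rewrite author's own statement) =====
-- stated objective: faster
-- what changed: B replaces A's per-task substring query ('task.lower() in work') by building a hash set of every substring of the lowered work text whose length is one of the distinct lowered-task lengths, then partitions tasks in order by a single set lookup each.
import Mathlib
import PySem

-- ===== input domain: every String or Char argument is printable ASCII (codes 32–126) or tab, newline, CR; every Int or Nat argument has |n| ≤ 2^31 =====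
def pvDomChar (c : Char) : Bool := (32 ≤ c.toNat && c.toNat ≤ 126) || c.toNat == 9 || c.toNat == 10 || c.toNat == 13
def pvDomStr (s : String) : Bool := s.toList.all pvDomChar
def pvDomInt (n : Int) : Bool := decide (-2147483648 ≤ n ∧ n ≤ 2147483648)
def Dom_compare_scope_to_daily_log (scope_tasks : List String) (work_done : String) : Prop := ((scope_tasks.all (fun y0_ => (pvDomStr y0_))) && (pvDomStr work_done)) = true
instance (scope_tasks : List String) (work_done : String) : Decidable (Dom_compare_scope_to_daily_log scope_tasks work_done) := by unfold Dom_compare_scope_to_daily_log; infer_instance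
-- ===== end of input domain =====

-- B replaces A's per-task substring scan of work by a hash set of all substrings of the
-- lowered work text whose length is a distinct pattern length, then partitions the tasks
-- by a set lookup per task (objective: faster — no per-task scan of work).

-- ===== PORT A =====
-- one loop over tasks, 'task.lower() in work' per task, two accumulator lists
def compare_scope_to_daily_log (scope_tasks : List String) (work_done : String) : List (String × List String) :=
  let work := PySem.Str.lower work_done
  let cp := scope_tasks.foldl
    (fun (acc : List String × List String) task =>
      if PySem.Str.isIn (PySem.Str.lower task) work then
        (acc.1 ++ [task], acc.2)
      else
        (acc.1, acc.2 ++ [task]))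
    ([], [])
  [("completed", cp.1), ("pending", cp.2)]

-- ===== PORT B =====
-- Source B's substring set: lengths = set(len(p) for p in lowered); for each length, every
-- slice work[pos:pos+length] (iterating a set of Ints only to build another set: order-independent)
def pvSubs (lowered : List String) (work : String) : PySem.Set String :=
  (PySem.Set.ofList (lowered.map (fun p => (PySem.Str.len p : Int)))).foldl
    (fun subs L =>
      (PySem.List.pyRange 0 ((PySem.Str.len work : Int) - L + 1) 1).foldl
        (fun subs pos =>
          PySem.Set.add subs (PySem.Str.slice work (some pos) (some (pos + L))))
        subs)
    PySem.Set.empty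

def compare_scope_to_daily_log_alt (scope_tasks : List String) (work_done : String) : List (String × List String) :=
  let work := PySem.Str.lower work_done
  let lowered := scope_tasks.map PySem.Str.lower
  let subs := pvSubs lowered work
  [("completed", (scope_tasks.zip lowered).filterMap
      (fun tp => if PySem.Set.contains subs tp.2 then some tp.1 else none)),
   ("pending", (scope_tasks.zip lowered).filterMap
      (fun tp => if !PySem.Set.contains subs tp.2 then some tp.1 else none))]

-- ===== PRECONDITION & SPEC =====
def Spec_compare_scope_to_daily_log (scope_tasks : List String) (work_done : String) (out : List (String × List String)) : Prop := out = compare_scope_to_daily_log_alt scope_tasks work_done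
instance (scope_tasks : List String) (work_done : String) (out : List (String × List String)) : Decidable (Spec_compare_scope_to_daily_log scope_tasks work_done out) := by unfold Spec_compare_scope_to_daily_log; infer_instance

-- ===== CLAIM =====
def Claim_equal_compare_scope_to_daily_log : Prop := ∀ (scope_tasks : List String) (work_done : String), Dom_compare_scope_to_daily_log scope_tasks work_done → Spec_compare_scope_to_daily_log scope_tasks work_done (compare_scope_to_daily_log scope_tasks work_done)

-- ===== LEMMAS AND PROOFS =====

-- A's loop: the fold is a filter-partition of the remaining tasks.
theorem pv_a_fold (r : String → Bool) (ts : List String) (c p : List String) :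
    ts.foldl
      (fun (acc : List String × List String) task =>
        if r task then (acc.1 ++ [task], acc.2) else (acc.1, acc.2 ++ [task]))
      (c, p)
    = (c ++ ts.filter r, p ++ ts.filter (fun t => !r t)) := by
  induction ts generalizing c p with
  | nil => simp
  | cons t ts ih =>
    simp only [List.foldl_cons, List.filter_cons]
    by_cases h : r t <;> simp [h, ih]

-- membership after a fold whose every step satisfies a step characterization
theorem pv_fold_mem {α β : Type} (Q : β → α → Prop) (F : List α → β → List α)
    (hF : ∀ h b x, x ∈ F h b ↔ x ∈ h ∨ Q b x)
    (l : List β) (h : List α) (x : α) :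
    (x ∈ l.foldl F h) ↔ x ∈ h ∨ ∃ b ∈ l, Q b x := by
  induction l generalizing h with
  | nil => simp
  | cons a l ih =>
    simp only [List.foldl_cons]
    rw [ih, hF]
    simp
    tauto

-- the substring set contains exactly the substrings of work of a collected length;
-- for a pattern p of the list itself that is exactly 'p occurs in work'
theorem pv_subs_contains (lowered : List String) (work : String) (p : String)
    (hp : p ∈ lowered) :
    PySem.Set.contains (pvSubs lowered work) p = PySem.Str.isIn p work := by
  rw [Bool.eq_iff_iff, PySem.Set.contains_iff, PySem.Str.isIn_eq,
      PySem.Chars.isIn_iff_infix]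
  unfold pvSubs
  rw [pv_fold_mem
      (fun L x => ∃ pos ∈ PySem.List.pyRange 0 ((PySem.Str.len work : Int) - L + 1) 1,
        x = PySem.Str.slice work (some pos) (some (pos + L)))
      _
      (fun h L x => by
        rw [pv_fold_mem (fun pos x => x = PySem.Str.slice work (some pos) (some (pos + L)))
              _ (fun h pos x => by rw [PySem.Set.mem_add]) _ h x])]
  simp only [PySem.Set.empty, List.not_mem_nil, false_or]
  constructor
  · rintro ⟨L, hL, pos, hpos, rfl⟩
    rw [PySem.Set.mem_ofList] at hL
    obtain ⟨q, _, rfl⟩ := List.mem_map.mp hL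
    rw [PySem.List.mem_pyRange_one] at hpos
    have h1 : (PySem.Str.slice work (some pos)
          (some (pos + (PySem.Str.len q : Int)))).toList
        = List.take ((pos + (PySem.Str.len q : Int)).toNat - pos.toNat)
            (List.drop pos.toNat work.toList) := by
      rw [PySem.Str.toList_slice, PySem.Chars.slice_eq_listSlice,
          PySem.List.slice_toNat _ hpos.1 (by
            have hq : (0 : Int) ≤ (PySem.Str.len q : Int) := Int.natCast_nonneg _
            have hp0 := hpos.1
            omega)]
    rw [h1]
    exact (List.take_prefix _ _).isInfix.trans (List.drop_suffix _ _).isInfix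
  · rintro ⟨u, v, huv⟩
    have hlen : work.toList.length = u.length + p.toList.length + v.length := by
      rw [← huv]; simp only [List.length_append]
    refine ⟨(p.length : Int), ?_, (u.length : Int), ?_, ?_⟩
    · rw [PySem.Set.mem_ofList]
      exact List.mem_map.mpr ⟨p, hp, by simp [PySem.Str.len_eq]⟩
    · rw [PySem.List.mem_pyRange_one]
      have hl : p.length = p.toList.length := by simp
      constructor
      · positivity
      · simp only [PySem.Str.len_eq]
        omega
    · apply (String.toList_injective ?_).symm
      rw [PySem.Str.toList_slice, PySem.Chars.slice_eq_listSlice,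
          PySem.List.slice_toNat _ (by positivity) (by positivity)]
      have h2 : ((u.length : Int) + (p.length : Int)).toNat - ((u.length : Int)).toNat
          = p.length := by omega
      have hl : p.length = p.toList.length := by simp
      have h3 : ((u.length : Int)).toNat = u.length := by omega
      rw [h2, h3, ← huv, List.append_assoc, hl, List.drop_left, List.take_left]

-- zipping the tasks with their lowered forms and filtering on the lowered form = filter
theorem pv_zip_filterMap (ts : List String) (f : String → String)
    (q : String → Bool) (r : String → Bool)
    (hqr : ∀ t ∈ ts, q (f t) = r t) :
    ((ts.zip (ts.map f)).filterMap
        (fun tp => if q tp.2 then some tp.1 else none))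
      = ts.filter r := by
  induction ts with
  | nil => simp
  | cons t ts ih =>
    have h0 : q (f t) = r t := hqr t (by simp)
    have hrec := ih (fun t ht => hqr t (by simp [ht]))
    simp only [List.map_cons, List.zip_cons_cons, List.filterMap_cons, List.filter_cons, h0]
    by_cases h : r t <;> simp [h, hrec]

-- ===== VERDICT =====
theorem compare_scope_to_daily_log_spec : Claim_equal_compare_scope_to_daily_log := by
  intro scope_tasks work_done _
  unfold Spec_compare_scope_to_daily_log
  show compare_scope_to_daily_log scope_tasks work_done
      = compare_scope_to_daily_log_alt scope_tasks work_done
  unfold compare_scope_to_daily_log compare_scope_to_daily_log_alt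
  simp only []
  rw [pv_a_fold,
      pv_zip_filterMap scope_tasks PySem.Str.lower
        (fun s => PySem.Set.contains
          (pvSubs (scope_tasks.map PySem.Str.lower) (PySem.Str.lower work_done)) s)
        (fun t => PySem.Str.isIn (PySem.Str.lower t) (PySem.Str.lower work_done))
        (fun t ht => pv_subs_contains _ _ _ (List.mem_map.mpr ⟨t, ht, rfl⟩)),
      pv_zip_filterMap scope_tasks PySem.Str.lower
        (fun s => !PySem.Set.contains
          (pvSubs (scope_tasks.map PySem.Str.lower) (PySem.Str.lower work_done)) s)
        (fun t => !PySem.Str.isIn (PySem.Str.lower t) (PySem.Str.lower work_done))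
        (fun t ht => by
          simp only [pv_subs_contains _ _ _
            (List.mem_map.mpr ⟨t, ht, (rfl : PySem.Str.lower t = PySem.Str.lower t)⟩)])]
  simp
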